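-- pv_equiv track=rewrite | github.com/ho8ae/Coding-TEST | 백준/Gold/20437. 문자열 게임 2/문자열 게임 2.py | solve
-- ===== SOURCE A (Python) =====
-- def solve(W, K):
--     if K > len(W):  # K가 문자열 길이보다 크면 불가능
--         return [-1]
--
--     min_length = float('inf')  # 가장 짧은 길이
--     max_length = -1  # 가장 긴 길이
--
--     # 각 알파벳의 위치를 저장
--     char_positions = {}
--     for i, char in enumerate(W):
--         if char not in char_positions:
--             char_positions[char] = []
--         char_positions[char].append(i)
--
--     # 각 문자에 대해 K개를 포함하는 연속 문자열 찾기
--     for char, positions in char_positions.items():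
--         if len(positions) >= K:  # K개 이상 있는 문자에 대해서만
--             # K개씩 묶어서 확인
--             for i in range(len(positions) - K + 1):
--                 # 현재 위치부터 K개 뒤의 위치까지의 길이
--                 curr_length = positions[i + K - 1] - positions[i] + 1
--
--                 # 첫글자와 마지막 글자가 같은 경우(항상 같음)
--                 if K == 1 or (positions[i] == 0 or W[positions[i]] == W[positions[i + K - 1]]):
--                     max_length = max(max_length, curr_length)
--
--                 min_length = min(min_length, curr_length)
--
--     if min_length == float('inf'):  # 가능한 경우가 없으면
--         return [-1]
--
--     return [min_length, max_length]
-- ===== SOURCE B (Python) =====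
-- def solve(W, K):
--     # Occurrence-rank formulation: the r-th occurrence of a char pairs with the
--     # occurrence K-1 ranks earlier via a flat (char, rank) -> index dict; all
--     # window lengths are collected in one linear pass and min/max taken at the end.
--     if K > len(W):
--         return [-1]
--     rank = {}
--     where = {}
--     lengths = []
--     for i, ch in enumerate(W):
--         r = rank.get(ch, 0) + 1
--         rank[ch] = r
--         where[(ch, r)] = i
--         if r >= K:
--             lengths.append(i - where[(ch, r - K + 1)] + 1)
--     if not lengths:
--         return [-1]
--     return [min(lengths), max(lengths)]
-- ===== Notes on version B (the rewrite author's own statement) =====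
-- stated objective: alternative
-- what changed: B drops A's per-char position lists and nested per-char window loop entirely: it numbers each character by its occurrence rank, records each (char, rank) -> index in a flat dict, pairs index i with the occurrence K-1 ranks earlier in the same single pass, and returns builtin min/max of the collected length list instead of running min/max accumulators with A's always-true guard.
import Mathlib
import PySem

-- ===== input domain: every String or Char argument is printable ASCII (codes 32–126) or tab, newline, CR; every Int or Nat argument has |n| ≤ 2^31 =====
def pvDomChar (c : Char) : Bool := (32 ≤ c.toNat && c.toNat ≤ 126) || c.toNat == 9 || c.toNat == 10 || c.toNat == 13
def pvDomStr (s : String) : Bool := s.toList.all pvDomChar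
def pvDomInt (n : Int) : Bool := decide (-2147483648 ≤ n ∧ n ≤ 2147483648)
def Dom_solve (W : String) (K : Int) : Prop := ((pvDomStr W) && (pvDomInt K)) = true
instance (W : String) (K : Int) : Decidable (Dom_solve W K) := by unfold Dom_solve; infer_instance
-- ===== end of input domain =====

-- B replaces A's per-char position lists and nested window scans by occurrence-rank
-- bookkeeping with a flat (char, rank) -> index dict, collecting all window lengths
-- in one pass and taking builtin min/max at the end (objective: alternative).

-- ===== PORT A =====
def solve (W : String) (K : Int) : List Int :=
  if K > PySem.Str.len W then [-1]
  else
    let cs := W.toList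
    -- min_length = float('inf') is modelled as (none : Option Int); max_length = -1
    let cp := (PySem.List.enumerate cs).foldl
      (fun (d : PySem.Dict Char (List Int)) p =>
        let d := if d.contains p.2 then d else d.insert p.2 []
        d.modify p.2 [] (fun l => l ++ [p.1]))
      PySem.Dict.empty
    let st := cp.items.foldl
      (fun (st : Option Int × Int) cp2 =>
        if K ≤ (cp2.2.length : Int) then
          (PySem.List.pyRange 0 ((cp2.2.length : Int) - K + 1)).foldl
            (fun st i =>
              let currLength := PySem.List.pyGetD cp2.2 (i + K - 1) 0 - PySem.List.pyGetD cp2.2 i 0 + 1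
              let mx := if K = 1 ∨ PySem.List.pyGetD cp2.2 i 0 = 0 ∨
                           PySem.List.pyGetD cs (PySem.List.pyGetD cp2.2 i 0) ' ' =
                           PySem.List.pyGetD cs (PySem.List.pyGetD cp2.2 (i + K - 1) 0) ' '
                        then max st.2 currLength else st.2
              let mn := match st.1 with
                | none => some currLength
                | some m => some (min m currLength)
              (mn, mx))
            st
        else st)
      ((none : Option Int), (-1 : Int))
    match st.1 with
    | none => [-1]
    | some m => [m, st.2]

-- ===== PORT B =====
def solve_alt (W : String) (K : Int) : List Int :=
  if K > PySem.Str.len W then [-1]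
  else
    let st := (PySem.List.enumerate W.toList).foldl
      (fun (st : PySem.Dict Char Int × PySem.Dict (Char × Int) Int × List Int) p =>
        let r := st.1.getD p.2 0 + 1
        let rank := st.1.insert p.2 r
        let whr := st.2.1.insert (p.2, r) p.1
        if K ≤ r then
          (rank, whr, st.2.2 ++ [p.1 - whr.getD (p.2, r - K + 1) 0 + 1])
        else (rank, whr, st.2.2))
      ((PySem.Dict.empty : PySem.Dict Char Int),
       (PySem.Dict.empty : PySem.Dict (Char × Int) Int), ([] : List Int))
    if st.2.2 = [] then [-1]
    else [(PySem.List.min? st.2.2 (fun x => x)).getD 0,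
          (PySem.List.max? st.2.2 (fun x => x)).getD 0]

-- ===== PRECONDITION & SPEC =====
-- Pre_ excludes exactly K ≤ 0 with a nonempty W, where Python A raises IndexError
-- (positions[i] runs past the list when K ≤ 0).
def Pre_solve (W : String) (K : Int) : Prop := 1 ≤ K ∨ W.toList = []
instance (W : String) (K : Int) : Decidable (Pre_solve W K) := by unfold Pre_solve; infer_instance
def pvWitness_solve : String × Int := ("aaabba", 2)

def Spec_solve (W : String) (K : Int) (out : List Int) : Prop := out = solve_alt W K
instance (W : String) (K : Int) (out : List Int) : Decidable (Spec_solve W K out) := by unfold Spec_solve; infer_instance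

-- ===== CLAIM (what is proved, stated in full; the proofs are below) =====
def Claim_equal_solve : Prop := ∀ (W : String) (K : Int), Dom_solve W K → Pre_solve W K → Spec_solve W K (solve W K)

-- ===== LEMMAS AND PROOFS =====

-- A's min/max accumulator step
def pvF (st : Option Int × Int) (curr : Int) : Option Int × Int :=
  ((match st.1 with | none => some curr | some m => some (min m curr)), max st.2 curr)

-- positions of character c in cs, as A's index dict stores them
def pvPos (cs : List Char) (c : Char) : List Int :=
  ((PySem.List.enumerate cs).filter (fun p => p.2 == c)).map (fun p => p.1)

-- the window lengths of one positions list, in A's inner-loop order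
def pvWin (K : Int) (ps : List Int) : List Int :=
  (PySem.List.pyRange 0 ((ps.length : Int) - K + 1)).map
    (fun i => PySem.List.pyGetD ps (i + K - 1) 0 - PySem.List.pyGetD ps i 0 + 1)

-- all window lengths in A's (char-grouped) order
def pvLA (K : Int) (cs : List Char) : List Int :=
  (PySem.Set.ofList cs).flatMap (fun c => pvWin K (pvPos cs c))

-- A's index dict (without the redundant membership guard)
def pvDict (cs : List Char) : PySem.Dict Char (List Int) :=
  (PySem.List.enumerate cs).foldl
    (fun d p => d.modify p.2 [] (fun l => l ++ [p.1])) PySem.Dict.empty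


theorem guard_modify (d : PySem.Dict Char (List Int)) (k : Char) (f : List Int → List Int) :
    (if d.contains k then d else d.insert k []).modify k [] f = d.modify k [] f := by
  by_cases h : d.contains k
  · simp [h]
  · simp only [h, Bool.false_eq_true, if_false]
    show (d.insert k []).insert k (f ((d.insert k []).getD k [])) = d.insert k (f (d.getD k []))
    rw [PySem.Dict.getD_insert_self, PySem.Dict.insert_insert_self,
        PySem.Dict.getD_of_not_contains (h := by simpa using h)]

theorem dictA_eq (cs : List Char) :
    (PySem.List.enumerate cs).foldl
      (fun (d : PySem.Dict Char (List Int)) p =>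
        let d := if d.contains p.2 then d else d.insert p.2 []
        d.modify p.2 [] (fun l => l ++ [p.1]))
      PySem.Dict.empty = pvDict cs := by
  unfold pvDict
  apply PySem.List.foldl_congr_mem
  intro d p _
  exact guard_modify d p.2 (fun l => l ++ [p.1])

theorem pvDict_getD (cs : List Char) (c : Char) : (pvDict cs).getD c [] = pvPos cs c := by
  unfold pvDict pvPos
  have h : (PySem.List.enumerate cs).foldl
      (fun (d : PySem.Dict Char (List Int)) p => d.modify p.2 [] (fun l => l ++ [p.1])) PySem.Dict.empty
    = ((PySem.List.enumerate cs).map (fun p => (p.2, p.1))).foldl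
      (fun (d : PySem.Dict Char (List Int)) q => d.modify q.1 [] (fun l => l ++ [q.2])) PySem.Dict.empty := by
    rw [List.foldl_map]
  rw [h, PySem.Dict.getD_foldl_modify_append]
  simp [List.filter_map, List.map_map, Function.comp_def]

theorem pvDict_keys (cs : List Char) : (pvDict cs).keys = PySem.Set.ofList cs := by
  unfold pvDict
  rw [PySem.Dict.keys_foldl_modify_key (PySem.List.enumerate cs) (fun p => p.2) []
       (fun _ p => (fun l => l ++ [p.1]))]
  rw [PySem.List.map_snd_enumerate]
  simp [PySem.Dict.keys_empty, PySem.Set.ofList_eq_foldl, PySem.Set.update]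

theorem pvDict_nodup (cs : List Char) : (pvDict cs).keys.Nodup := by
  unfold pvDict
  exact PySem.Dict.nodup_keys_foldl_modify_key (PySem.List.enumerate cs) (fun p => p.2) []
    (fun _ p => (fun l => l ++ [p.1])) PySem.Dict.empty (by simp)

theorem pvDict_items (cs : List Char) :
    (pvDict cs).items = (PySem.Set.ofList cs).map (fun c => (c, pvPos cs c)) := by
  rw [PySem.Dict.items_eq_map_keys (pvDict cs) (pvDict_nodup cs) []]
  rw [pvDict_keys]
  exact List.map_congr_left (fun c _ => by rw [pvDict_getD])

theorem pvPos_mem (cs : List Char) (c : Char) (j : Int) (hj : j ∈ pvPos cs c) :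
    0 ≤ j ∧ j < (cs.length : Int) ∧ PySem.List.pyGetD cs j ' ' = c := by
  unfold pvPos at hj
  simp only [List.mem_map, List.mem_filter] at hj
  obtain ⟨p, ⟨hpe, hpc⟩, hpj⟩ := hj
  rw [PySem.List.mem_enumerate_iff] at hpe
  obtain ⟨k, hk, rfl⟩ := hpe
  simp only at hpj hpc
  subst hpj
  simp only [beq_iff_eq] at hpc
  refine ⟨by positivity, by omega, ?_⟩
  rw [PySem.List.pyGetD_eq_getElem cs ' ' (by positivity) (by omega)]
  simpa using hpc

theorem pvPos_char (cs : List Char) (c : Char) (j : Int)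
    (h0 : 0 ≤ j) (h1 : j < ((pvPos cs c).length : Int)) :
    PySem.List.pyGetD cs (PySem.List.pyGetD (pvPos cs c) j 0) ' ' = c := by
  have hmem : PySem.List.pyGetD (pvPos cs c) j 0 ∈ pvPos cs c := by
    rw [PySem.List.pyGetD_eq_getElem _ 0 h0 h1]
    exact List.getElem_mem _
  exact (pvPos_mem cs c _ hmem).2.2

theorem pyRange_nil (a b : Int) (h : b ≤ a) : PySem.List.pyRange a b = [] := by
  rw [PySem.List.pyRange_one]
  simp [Int.toNat_eq_zero.mpr (by omega : b - a ≤ 0)]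

theorem foldA_eq (cs : List Char) (K : Int) (hK : 1 ≤ K) :
    ((pvDict cs).items.foldl
      (fun (st : Option Int × Int) cp2 =>
        if K ≤ (cp2.2.length : Int) then
          (PySem.List.pyRange 0 ((cp2.2.length : Int) - K + 1)).foldl
            (fun st i =>
              let currLength := PySem.List.pyGetD cp2.2 (i + K - 1) 0 - PySem.List.pyGetD cp2.2 i 0 + 1
              let mx := if K = 1 ∨ PySem.List.pyGetD cp2.2 i 0 = 0 ∨
                           PySem.List.pyGetD cs (PySem.List.pyGetD cp2.2 i 0) ' ' =
                           PySem.List.pyGetD cs (PySem.List.pyGetD cp2.2 (i + K - 1) 0) ' '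
                        then max st.2 currLength else st.2
              let mn := match st.1 with
                | none => some currLength
                | some m => some (min m currLength)
              (mn, mx))
            st
        else st)
      ((none : Option Int), (-1 : Int)))
    = List.foldl pvF (none, -1) (pvLA K cs) := by
  rw [pvDict_items]
  rw [List.foldl_map]
  unfold pvLA
  rw [List.foldl_flatMap]
  apply PySem.List.foldl_congr_mem
  intro st c _
  simp only
  by_cases hlen : K ≤ ((pvPos cs c).length : Int)
  · rw [if_pos hlen]
    unfold pvWin
    rw [List.foldl_map]
    apply PySem.List.foldl_congr_mem
    intro st' i hi
    rw [PySem.List.mem_pyRange_one] at hi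
    have hcond : K = 1 ∨ PySem.List.pyGetD (pvPos cs c) i 0 = 0 ∨
        PySem.List.pyGetD cs (PySem.List.pyGetD (pvPos cs c) i 0) ' ' =
        PySem.List.pyGetD cs (PySem.List.pyGetD (pvPos cs c) (i + K - 1) 0) ' ' := by
      by_cases h1 : K = 1
      · exact Or.inl h1
      · refine Or.inr (Or.inr ?_)
        rw [pvPos_char cs c i hi.1 (by omega),
            pvPos_char cs c (i + K - 1) (by omega) (by omega)]
    simp only [hcond, if_pos]
    rfl
  · rw [if_neg hlen]
    unfold pvWin
    rw [pyRange_nil 0 _ (by omega)]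
    rfl

theorem pyGetD_neg (xs : List Int) (k : Int) (hk : 1 ≤ k) (hlen : k ≤ (xs.length : Int)) :
    PySem.List.pyGetD xs (-k) 0 = PySem.List.pyGetD xs ((xs.length : Int) - k) 0 := by
  unfold PySem.List.pyGetD PySem.List.pyGet? PySem.List.pyIdx?
  have h1 : ¬ (0 ≤ -k) := by omega
  have h2 : -(xs.length : Int) ≤ -k := by omega
  have h3 : 0 ≤ (xs.length : Int) - k := by omega
  have h4 : (xs.length : Int) - k < (xs.length : Int) := by omega
  rw [if_neg h1, if_pos h2, if_pos h3, if_pos h4]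
  have : xs.length - (-(-k)).toNat = ((xs.length : Int) - k).toNat := by omega
  rw [this]

theorem pyGetD_append_left (ps : List Int) (x : Int) (i : Int) (h0 : 0 ≤ i) (h1 : i < (ps.length : Int)) :
    PySem.List.pyGetD (ps ++ [x]) i 0 = PySem.List.pyGetD ps i 0 := by
  rw [PySem.List.pyGetD_eq_getElem _ 0 h0 (by simp; omega),
      PySem.List.pyGetD_eq_getElem _ 0 h0 h1]
  rw [List.getElem_append_left (by omega)]

theorem pyGetD_append_last (ps : List Int) (x : Int) :
    PySem.List.pyGetD (ps ++ [x]) (ps.length : Int) 0 = x := by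
  rw [PySem.List.pyGetD_eq_getElem _ 0 (by positivity) (by simp)]
  simp

theorem pvWin_snoc (K : Int) (hK : 1 ≤ K) (ps : List Int) (x : Int) :
    pvWin K (ps ++ [x]) = pvWin K ps ++
      (if K ≤ ((ps ++ [x]).length : Int) then
        [PySem.List.pyGetD (ps ++ [x]) (-1) 0 - PySem.List.pyGetD (ps ++ [x]) (-K) 0 + 1]
       else []) := by
  unfold pvWin
  by_cases h : K ≤ ((ps ++ [x]).length : Int)
  · rw [if_pos h]
    simp only [List.length_append, List.length_cons, List.length_nil] at h ⊢
    have hlen : ((ps.length + 1 : Nat) : Int) - K + 1 = (((ps.length : Int) - K + 1) + 1) := by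
      push_cast; ring
    rw [hlen, PySem.List.pyRange_one_succ_right (by push_cast at h ⊢; omega)]
    rw [List.map_append]
    congr 1
    · apply List.map_congr_left
      intro i hi
      rw [PySem.List.mem_pyRange_one] at hi
      rw [pyGetD_append_left ps x (i + K - 1) (by omega) (by omega),
          pyGetD_append_left ps x i (by omega) (by omega)]
    · simp only [List.map_cons, List.map_nil]
      rw [pyGetD_neg (ps ++ [x]) 1 le_rfl (by push_cast [List.length_append, List.length_cons, List.length_nil]; omega),
          pyGetD_neg (ps ++ [x]) K hK (by push_cast [List.length_append, List.length_cons, List.length_nil] at h ⊢; omega)]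
      have e1 : (↑ps.length : Int) - K + 1 + K - 1 = ((ps ++ [x]).length : Int) - 1 := by
        simp only [List.length_append, List.length_cons, List.length_nil]; push_cast; ring
      have e2 : (↑ps.length : Int) - K + 1 = ((ps ++ [x]).length : Int) - K := by
        simp only [List.length_append, List.length_cons, List.length_nil]; push_cast; ring
      rw [e1, e2]
  · rw [if_neg h]
    simp only [List.length_append, List.length_cons, List.length_nil] at h
    have e1 : PySem.List.pyRange 0 (((ps ++ [x]).length : Int) - K + 1) = [] := by
      apply pyRange_nil; simp; push_cast at h ⊢; omega
    have e2 : PySem.List.pyRange 0 ((ps.length : Int) - K + 1) = [] := by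
      apply pyRange_nil; push_cast at h ⊢; omega
    simp only [e1, e2, List.map_nil, List.append_nil]

theorem pvPos_snoc (cs : List Char) (c c' : Char) :
    pvPos (cs ++ [c]) c' = pvPos cs c' ++ (if c = c' then [(cs.length : Int)] else []) := by
  unfold pvPos
  rw [PySem.List.enumerate_append, List.filter_append, List.map_append]
  congr 1
  simp [PySem.List.enumerate_cons, PySem.List.enumerate_nil]
  split_ifs with hc <;> simp_all

theorem pvPos_not_mem (cs : List Char) (c : Char) (h : c ∉ cs) : pvPos cs c = [] := by
  unfold pvPos
  rw [List.map_eq_nil_iff, List.filter_eq_nil_iff]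
  intro p hp
  rw [PySem.List.mem_enumerate_iff] at hp
  obtain ⟨k, hk, rfl⟩ := hp
  simp only [beq_iff_eq]
  intro he
  exact absurd (he ▸ List.getElem_mem hk) h

theorem ofList_snoc_mem (cs : List Char) (c : Char) (h : c ∈ cs) :
    PySem.Set.ofList (cs ++ [c]) = PySem.Set.ofList cs := by
  rw [PySem.Set.ofList_eq_foldl, List.foldl_append, ← PySem.Set.ofList_eq_foldl]
  simp only [List.foldl_cons, List.foldl_nil, PySem.Set.add]
  rw [if_pos]
  simpa [PySem.Set.contains] using (PySem.Set.mem_ofList cs c).2 h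

theorem ofList_snoc_not_mem (cs : List Char) (c : Char) (h : c ∉ cs) :
    PySem.Set.ofList (cs ++ [c]) = PySem.Set.ofList cs ++ [c] := by
  rw [PySem.Set.ofList_eq_foldl, List.foldl_append, ← PySem.Set.ofList_eq_foldl]
  simp only [List.foldl_cons, List.foldl_nil, PySem.Set.add]
  rw [if_neg]
  intro hc
  exact absurd ((PySem.Set.mem_ofList cs c).1 (by simpa [PySem.Set.contains] using hc)) h

theorem flatMap_congr_ne (K : Int) (cs : List Char) (c : Char) (L : List Char) (hL : c ∉ L) :
    L.flatMap (fun c' => pvWin K (pvPos (cs ++ [c]) c')) =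
    L.flatMap (fun c' => pvWin K (pvPos cs c')) := by
  induction L with
  | nil => rfl
  | cons a t ih =>
    simp only [List.flatMap_cons]
    rw [ih (fun h => hL (List.mem_cons_of_mem _ h)),
        pvPos_snoc cs c a, if_neg (fun h => hL (by rw [h]; exact List.mem_cons_self)), List.append_nil]

theorem pvLA_snoc (K : Int) (hK : 1 ≤ K) (cs : List Char) (c : Char) :
    (pvLA K (cs ++ [c])).Perm
      (pvLA K cs ++
        (if K ≤ ((pvPos cs c ++ [(cs.length : Int)]).length : Int) then
          [PySem.List.pyGetD (pvPos cs c ++ [(cs.length : Int)]) (-1) 0 -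
           PySem.List.pyGetD (pvPos cs c ++ [(cs.length : Int)]) (-K) 0 + 1]
         else [])) := by
  have hlst : pvPos (cs ++ [c]) c = pvPos cs c ++ [(cs.length : Int)] := by
    rw [pvPos_snoc, if_pos rfl]
  by_cases hc : c ∈ cs
  · obtain ⟨X, Y, hsplit⟩ := List.append_of_mem ((PySem.Set.mem_ofList cs c).2 hc)
    have hnd := PySem.Set.nodup_ofList cs
    rw [hsplit] at hnd
    have hcX : c ∉ X := by
      intro h; exact (List.disjoint_of_nodup_append hnd) h List.mem_cons_self
    have hcY : c ∉ Y := by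
      have := (List.nodup_append.mp hnd).2.1
      exact (List.nodup_cons.mp this).1
    unfold pvLA
    rw [ofList_snoc_mem cs c hc, hsplit]
    simp only [List.flatMap_append, List.flatMap_cons]
    rw [flatMap_congr_ne K cs c X hcX, flatMap_congr_ne K cs c Y hcY,
        hlst, pvWin_snoc K hK]
    simp only [List.append_assoc]
    exact List.Perm.append_left _ (List.Perm.append_left _ List.perm_append_comm)
  · unfold pvLA
    rw [ofList_snoc_not_mem cs c hc]
    simp only [List.flatMap_append, List.flatMap_cons, List.flatMap_nil, List.append_nil]
    rw [flatMap_congr_ne K cs c _ (fun h => hc ((PySem.Set.mem_ofList cs c).1 h)),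
        hlst, pvWin_snoc K hK, pvPos_not_mem cs c hc]
    have hw : pvWin K [] = [] := by
      unfold pvWin
      rw [pyRange_nil 0 _ (by simp; omega)]
      rfl
    simp [hw]

-- ----- B-side lemmas -----

theorem pvPos_pairwise (cs : List Char) (c : Char) : (pvPos cs c).Pairwise (· ≤ ·) := by
  unfold pvPos
  rw [List.pairwise_map]
  exact ((PySem.List.pairwise_lt_enumerate cs 0).filter _).imp (fun h => le_of_lt h)

theorem pyGetD_mono (ps : List Int) (h : ps.Pairwise (· ≤ ·)) (i j : Int)
    (h0 : 0 ≤ i) (hij : i ≤ j) (hj : j < (ps.length : Int)) :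
    PySem.List.pyGetD ps i 0 ≤ PySem.List.pyGetD ps j 0 := by
  rw [PySem.List.pyGetD_eq_getElem _ 0 h0 (lt_of_le_of_lt hij hj),
      PySem.List.pyGetD_eq_getElem _ 0 (le_trans h0 hij) hj]
  rcases eq_or_lt_of_le hij with he | hlt
  · subst he; exact le_refl _
  · exact (List.pairwise_iff_getElem.mp h) i.toNat j.toNat (by omega) (by omega) (by omega)

theorem pvLA_pos (K : Int) (hK : 1 ≤ K) (cs : List Char) :
    ∀ x ∈ pvLA K cs, 1 ≤ x := by
  intro x hx
  unfold pvLA at hx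
  rw [List.mem_flatMap] at hx
  obtain ⟨c, _, hx⟩ := hx
  unfold pvWin at hx
  rw [List.mem_map] at hx
  obtain ⟨i, hi, rfl⟩ := hx
  rw [PySem.List.mem_pyRange_one] at hi
  have := pyGetD_mono (pvPos cs c) (pvPos_pairwise cs c) i (i + K - 1)
    hi.1 (by omega) (by omega)
  omega

theorem foldl_min_pull (l : List Int) (x y : Int) :
    l.foldl min (min x y) = min x (l.foldl min y) := by
  induction l generalizing y with
  | nil => rfl
  | cons a t ih =>
    simp only [List.foldl_cons]
    rw [min_assoc, ih]

theorem foldl_max_pull (l : List Int) (x y : Int) :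
    l.foldl max (max x y) = max x (l.foldl max y) := by
  induction l generalizing y with
  | nil => rfl
  | cons a t ih =>
    simp only [List.foldl_cons]
    rw [max_assoc, ih]

theorem min_rightComm : RightCommutative (min : Int → Int → Int) := by
  constructor
  intro b a1 a2
  rw [min_assoc, min_assoc, min_comm a1 a2]

theorem max_rightComm : RightCommutative (max : Int → Int → Int) := by
  constructor
  intro b a1 a2
  rw [max_assoc, max_assoc, max_comm a1 a2]

theorem perm_foldl_min (a₁ a₂ : Int) (l₁ l₂ : List Int)
    (hp : (a₁ :: l₁).Perm (a₂ :: l₂)) : l₁.foldl min a₁ = l₂.foldl min a₂ := by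
  haveI : RightCommutative (min : Int → Int → Int) := min_rightComm
  have key : ∀ x : Int, min x (l₁.foldl min a₁) = min x (l₂.foldl min a₂) := by
    intro x
    rw [← foldl_min_pull l₁ x a₁, ← foldl_min_pull l₂ x a₂]
    have := hp.foldl_eq (f := min) (b := x)
    simpa using this
  have h1 := key (l₁.foldl min a₁)
  have h2 := key (l₂.foldl min a₂)
  simp only [min_self] at h1 h2
  rw [min_comm] at h2
  omega

theorem perm_foldl_max (a₁ a₂ : Int) (l₁ l₂ : List Int)
    (hp : (a₁ :: l₁).Perm (a₂ :: l₂)) : l₁.foldl max a₁ = l₂.foldl max a₂ := by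
  haveI : RightCommutative (max : Int → Int → Int) := max_rightComm
  have key : ∀ x : Int, max x (l₁.foldl max a₁) = max x (l₂.foldl max a₂) := by
    intro x
    rw [← foldl_max_pull l₁ x a₁, ← foldl_max_pull l₂ x a₂]
    have := hp.foldl_eq (f := max) (b := x)
    simpa using this
  have h1 := key (l₁.foldl max a₁)
  have h2 := key (l₂.foldl max a₂)
  simp only [max_self] at h1 h2
  rw [max_comm] at h2
  omega

theorem foldF_some (L : List Int) (m x : Int) :
    List.foldl pvF (some m, x) L = (some (L.foldl min m), L.foldl max x) := by
  induction L generalizing m x with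
  | nil => rfl
  | cons a t ih =>
    simp only [List.foldl_cons]
    exact ih (min m a) (max x a)

theorem foldB_inv (K : Int) (hK : 1 ≤ K) (cs : List Char) :
    ∃ (R : PySem.Dict Char Int) (Wd : PySem.Dict (Char × Int) Int) (L : List Int),
      (PySem.List.enumerate cs).foldl
        (fun (st : PySem.Dict Char Int × PySem.Dict (Char × Int) Int × List Int) p =>
          let r := st.1.getD p.2 0 + 1
          let rank := st.1.insert p.2 r
          let whr := st.2.1.insert (p.2, r) p.1
          if K ≤ r then
            (rank, whr, st.2.2 ++ [p.1 - whr.getD (p.2, r - K + 1) 0 + 1])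
          else (rank, whr, st.2.2))
        ((PySem.Dict.empty : PySem.Dict Char Int),
         (PySem.Dict.empty : PySem.Dict (Char × Int) Int), ([] : List Int))
      = (R, Wd, L)
      ∧ (∀ c, R.getD c 0 = ((pvPos cs c).length : Int))
      ∧ (∀ (c : Char) (r : Int), 1 ≤ r → r ≤ ((pvPos cs c).length : Int) →
           Wd.getD (c, r) 0 = PySem.List.pyGetD (pvPos cs c) (r - 1) 0)
      ∧ L.Perm (pvLA K cs) := by
  induction cs using List.reverseRecOn with
  | nil =>
    refine ⟨PySem.Dict.empty, PySem.Dict.empty, [], ?_, ?_, ?_, ?_⟩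
    · rfl
    · intro c
      rw [PySem.Dict.getD_empty]
      simp [pvPos, PySem.List.enumerate_nil]
    · intro c r h1 h2
      simp [pvPos, PySem.List.enumerate_nil] at h2
      omega
    · simp [pvLA, PySem.Set.ofList_eq_foldl]
  | append_singleton cs c ih =>
    obtain ⟨R, Wd, L, hfold, hR, hW, hP⟩ := ih
    rw [show PySem.List.enumerate (cs ++ [c]) = PySem.List.enumerate (cs ++ [c]) 0 from rfl,
        PySem.List.enumerate_append, PySem.List.enumerate_cons, PySem.List.enumerate_nil]
    rw [List.foldl_append]
    rw [show (PySem.List.enumerate cs 0) = PySem.List.enumerate cs from rfl, hfold]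
    simp only [List.foldl_cons, List.foldl_nil, zero_add]
    have hps : pvPos (cs ++ [c]) c = pvPos cs c ++ [(cs.length : Int)] := by
      rw [pvPos_snoc, if_pos rfl]
    have hr0 : R.getD c 0 + 1 = ((pvPos cs c).length : Int) + 1 := by rw [hR]
    -- the new state's components
    set n : Int := (cs.length : Int) with hn
    set r₀ : Int := R.getD c 0 + 1 with hr₀def
    have hr₀ : r₀ = ((pvPos cs c).length : Int) + 1 := by rw [hr₀def, hR]
    have hlen' : ((pvPos (cs ++ [c]) c).length : Int) = r₀ := by
      rw [hps]; simp; omega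
    have hR' : ∀ c', (R.insert c r₀).getD c' 0 = ((pvPos (cs ++ [c]) c').length : Int) := by
      intro c'
      by_cases hc : c' = c
      · subst hc; rw [PySem.Dict.getD_insert_self, hlen']
      · rw [PySem.Dict.getD_insert_of_ne (hne := hc), hR c',
            pvPos_snoc cs c c', if_neg (fun h => hc h.symm), List.append_nil]
    have hW' : ∀ (c' : Char) (r : Int), 1 ≤ r → r ≤ ((pvPos (cs ++ [c]) c').length : Int) →
        (Wd.insert (c, r₀) n).getD (c', r) 0 = PySem.List.pyGetD (pvPos (cs ++ [c]) c') (r - 1) 0 := by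
      intro c' r h1 h2
      by_cases hc : c' = c
      · subst hc
        rw [hlen'] at h2
        by_cases hr : r = r₀
        · subst hr
          rw [PySem.Dict.getD_insert_self, hps]
          have : r₀ - 1 = ((pvPos cs c').length : Int) := by omega
          rw [this, pyGetD_append_last]
        · rw [PySem.Dict.getD_insert_of_ne (hne := by simp [hr]), hps,
              pyGetD_append_left _ _ _ (by omega) (by omega),
              hW c' r h1 (by omega)]
      · rw [PySem.Dict.getD_insert_of_ne (hne := by simp [hc]),
            hW c' r h1 (by rwa [pvPos_snoc cs c c', if_neg (fun h => hc h.symm), List.append_nil] at h2),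
            pvPos_snoc cs c c', if_neg (fun h => hc h.symm), List.append_nil]
    have hperm := pvLA_snoc K hK cs c
    by_cases hg : K ≤ r₀
    · rw [if_pos hg]
      refine ⟨_, _, _, rfl, hR', hW', ?_⟩
      have hguard : K ≤ ((pvPos cs c ++ [(cs.length : Int)]).length : Int) := by
        rw [← hps, hlen']; exact hg
      rw [if_pos hguard] at hperm
      have helt : n - (Wd.insert (c, r₀) n).getD (c, r₀ - K + 1) 0 + 1 =
          PySem.List.pyGetD (pvPos cs c ++ [(cs.length : Int)]) (-1) 0 -
          PySem.List.pyGetD (pvPos cs c ++ [(cs.length : Int)]) (-K) 0 + 1 := by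
        rw [hW' c (r₀ - K + 1) (by omega) (by omega)]
        rw [hps]
        rw [pyGetD_neg _ 1 le_rfl (by rw [← hps]; omega),
            pyGetD_neg _ K hK (by rw [← hps]; omega)]
        rw [← hps, hlen']
        have e1 : r₀ - 1 = ((pvPos cs c).length : Int) := by omega
        rw [show r₀ - K + 1 - 1 = r₀ - K from by ring]
        rw [hps, e1, pyGetD_append_last]
      rw [helt]
      exact (hP.append_right _).trans hperm.symm
    · rw [if_neg hg]
      refine ⟨_, _, _, rfl, hR', hW', ?_⟩
      have hguard : ¬ K ≤ ((pvPos cs c ++ [(cs.length : Int)]).length : Int) := by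
        rw [← hps, hlen']; exact hg
      rw [if_neg hguard, List.append_nil] at hperm
      exact hP.trans hperm.symm

-- ===== VERDICT (by name: the statement is the Claim_ definition above) =====
theorem solve_spec : Claim_equal_solve := by
  intro W K _ hpre
  unfold Spec_solve solve solve_alt
  rcases hpre with hK | hnil
  · by_cases hg : K > PySem.Str.len W
    · rw [if_pos hg, if_pos hg]
    · rw [if_neg hg, if_neg hg]
      simp only
      rw [dictA_eq, foldA_eq W.toList K hK]
      obtain ⟨R, Wd, L, hfold, _, _, hP⟩ := foldB_inv K hK W.toList
      rw [hfold]
      simp only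
      rcases hLA : pvLA K W.toList with _ | ⟨a, t⟩
      · rw [hLA] at hP
        have : L = [] := hP.eq_nil
        simp [this]
      · rw [hLA] at hP
        have hLne : L ≠ [] := by
          intro h; rw [h] at hP; exact absurd hP.symm.eq_nil (by simp)
        rcases L with _ | ⟨a', t'⟩
        · exact absurd rfl hLne
        have ha : (1 : Int) ≤ a := pvLA_pos K hK W.toList a (by rw [hLA]; exact List.mem_cons_self)
        have hA : List.foldl pvF (none, -1) (a :: t) = (some (t.foldl min a), t.foldl max a) := by
          simp only [List.foldl_cons]
          have : pvF (none, -1) a = (some a, max (-1) a) := rfl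
          rw [this, show max (-1 : Int) a = a from by omega]
          exact foldF_some t a a
        rw [hA]
        simp only [if_neg (by simp : ¬ (a' :: t' = []))]
        rw [PySem.List.min?_id_cons, PySem.List.max?_id_cons]
        simp only [Option.getD_some]
        rw [perm_foldl_min a' a t' t hP, perm_foldl_max a' a t' t hP]
  · by_cases hg : K > PySem.Str.len W
    · rw [if_pos hg, if_pos hg]
    · rw [if_neg hg, if_neg hg]
      simp only [hnil, PySem.List.enumerate_nil, List.foldl_nil]
      rfl
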